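-- pv_equiv track=rewrite | github.com/barszu/ASD | nauka1/zadania offline na wyslanie/zad3/backup/zad3.py | compare_srt
-- ===== SOURCE A (Python) =====
-- def obroc_wyrazy(T_str):
--     i=0
--     for s in T_str:
--         if s[0]>s[-1]:
--             T_str[i]=s[::-1]
--         i+=1
--
-- def compare_srt(tab_of_str,dl_str,n):
--     # n=len(tab_of_str)
--     if (n<1) : return 0
--     tab_laczen=[1]*n #ile podobnych str jest z tym
--     maxy=0
--     tab_of_str.sort()
--     obroc_wyrazy(tab_of_str)
--     for i in range(n):
--         for j in range(i+1,n):
--             a=tab_of_str[i]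
--             b=tab_of_str[j]
--             # c=b[::-1]
--             # if (a==b) or (a==c):
--             if (a==b):
--                 tab_laczen[i] += 1
--                 tab_laczen[j] += 1
--             # if is_equal(a,b,dl_str):
--             #     tab_laczen[i] += 1
--             #     tab_laczen[j] += 1
--                 if tab_laczen[i] > maxy : maxy=tab_laczen[i]
--     # optynmalizacja ? max=my_maxi_na ifach(tab_laczen[i]) po +1
--     # return max(tab_laczen)
--     return maxy
-- ===== SOURCE B (Python) =====
-- def compare_srt(tab_of_str, dl_str, n):
--     if n < 1:
--         return 0
--     # same observable side effects as the original: in-place sort, then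
--     # in-place reversal of every word whose first char is greater than its last
--     tab_of_str.sort()
--     for i, s in enumerate(tab_of_str):
--         if s[0] > s[-1]:
--             tab_of_str[i] = s[::-1]
--     # count multiplicities of the first n strings in one pass with a dict
--     counts = {}
--     for s in tab_of_str[:n]:
--         counts[s] = counts.get(s, 0) + 1
--     m = max(counts.values())
--     return m if m >= 2 else 0
-- ===== Notes on version B (the rewrite author's own statement) =====
-- stated objective: faster
-- what changed: The quadratic pairwise tally (tab_laczen array updated for every equal pair i<j, maxy tracked inside the inner loop) is replaced by a single-pass dict counter over the first n mutated strings whose maximum value is returned if it is >= 2, else 0; the in-place sort+reversal side effects are reproduced unchanged. Pre_ also excludes the corner n = 1 with an empty list, where A returns 0 without indexing anything while B's max() over an empty counter raises ValueError.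
-- outside the precondition, e.g. on compare_srt([], 0, 1): A returns 0, B raises ValueError
import Mathlib
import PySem

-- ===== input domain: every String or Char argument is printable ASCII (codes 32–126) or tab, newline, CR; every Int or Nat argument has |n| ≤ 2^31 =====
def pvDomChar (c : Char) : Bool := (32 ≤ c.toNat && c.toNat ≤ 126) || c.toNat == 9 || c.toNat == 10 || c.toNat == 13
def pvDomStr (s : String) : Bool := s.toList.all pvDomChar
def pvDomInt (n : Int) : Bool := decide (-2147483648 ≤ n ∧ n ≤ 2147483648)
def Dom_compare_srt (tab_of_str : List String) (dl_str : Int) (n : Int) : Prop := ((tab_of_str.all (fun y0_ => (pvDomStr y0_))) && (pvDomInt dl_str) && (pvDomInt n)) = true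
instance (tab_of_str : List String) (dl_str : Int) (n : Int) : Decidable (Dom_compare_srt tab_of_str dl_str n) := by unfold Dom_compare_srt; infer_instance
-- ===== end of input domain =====

-- B replaces A's quadratic pairwise tally by a one-pass dict counter over the first n
-- mutated strings (max value if ≥ 2 else 0); the Python A and B mutate tab_of_str in place
-- identically (sort + conditional word reversal) — the equivalence proved here is about the
-- return value, and the ports below are pure functions of the arguments.

-- ===== PORT A =====
-- s[::-1] applied when s[0] > s[-1]; Python raises IndexError on the empty string
-- (the `| _, _ => s` arm is unreachable under Pre_, which requires nonempty strings).
def pvRevIf (s : String) : String :=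
  match PySem.Str.pyGet? s 0, PySem.Str.pyGet? s (-1) with
  | some c0, some cl => if cl < c0 then (PySem.Str.slice? s none none (-1)).getD s else s
  | _, _ => s

def obroc_wyrazy (T_str : List String) : List String := T_str.map pvRevIf

def compare_srt (tab_of_str : List String) (dl_str : Int) (n : Int) : Int :=
  if n < 1 then 0
  else
    -- tab_of_str.sort(); obroc_wyrazy(tab_of_str)
    let M := obroc_wyrazy (PySem.List.sorted tab_of_str (fun s => s) false)
    -- tab_laczen = [1]*n; maxy = 0; nested for i / for j loops
    let r := (PySem.List.pyRange 0 n 1).foldl (fun st i =>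
        (PySem.List.pyRange (i + 1) n 1).foldl (fun st j =>
          let a := PySem.List.pyGetD M i ""      -- tab_of_str[i]; in range under Pre_
          let b := PySem.List.pyGetD M j ""      -- tab_of_str[j]; in range under Pre_
          if a = b then
            let t1 := PySem.List.pySetD st.1 i (PySem.List.pyGetD st.1 i 0 + 1)
            let t2 := PySem.List.pySetD t1 j (PySem.List.pyGetD t1 j 0 + 1)
            (t2, if st.2 < PySem.List.pyGetD t2 i 0 then PySem.List.pyGetD t2 i 0 else st.2)
          else st) st)
      (List.replicate n.toNat (1 : Int), (0 : Int))
    r.2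

-- ===== PORT B =====
def compare_srt_alt (tab_of_str : List String) (dl_str : Int) (n : Int) : Int :=
  if n < 1 then 0
  else
    -- same in-place mutation as A: sort, then reverse each word with s[0] > s[-1]
    let srt := PySem.List.sorted tab_of_str (fun s => s) false
    let mutated := srt.map (fun s =>
      match PySem.Str.pyGet? s 0, PySem.Str.pyGet? s (-1) with
      | some c0, some cl => if cl < c0 then (PySem.Str.slice? s none none (-1)).getD s else s
      | _, _ => s)
    -- counts = {}; for s in tab_of_str[:n]: counts[s] = counts.get(s, 0) + 1
    let counts := (PySem.List.slice mutated none (some n)).foldl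
      (fun d s => d.insert s (d.getD s 0 + 1)) PySem.Dict.empty
    -- m = max(counts.values()); Python raises ValueError on an empty dict — nonempty under Pre_
    let m := (PySem.List.max? counts.values (fun x => x)).getD 0
    if 2 ≤ m then m else 0

-- ===== PRECONDITION & SPEC =====
-- Pre_ excludes the inputs where Python A raises — for n ≥ 2 A indexes tab_of_str[j]
-- for all j < n (IndexError unless n ≤ len) and for n ≥ 1 it reverse-normalizes every
-- string (IndexError on an empty string) — and the corner n = 1 with an empty list,
-- where A returns 0 without ever indexing the list while B's max() over the empty
-- counter raises ValueError.
def Pre_compare_srt (tab_of_str : List String) (dl_str : Int) (n : Int) : Prop :=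
  n < 1 ∨ (n ≤ (tab_of_str.length : Int) ∧ ∀ s ∈ tab_of_str, s ≠ "")
instance (tab_of_str : List String) (dl_str : Int) (n : Int) : Decidable (Pre_compare_srt tab_of_str dl_str n) := by unfold Pre_compare_srt; infer_instance
def pvWitness_compare_srt : List String × Int × Int := (["ab", "ba", "xy"], 0, 3)

def Spec_compare_srt (tab_of_str : List String) (dl_str : Int) (n : Int) (out : Int) : Prop := out = compare_srt_alt tab_of_str dl_str n
instance (tab_of_str : List String) (dl_str : Int) (n : Int) (out : Int) : Decidable (Spec_compare_srt tab_of_str dl_str n out) := by unfold Spec_compare_srt; infer_instance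

-- ===== CLAIM (what is proved, stated in full; the proofs are below) =====
def Claim_equal_compare_srt : Prop := ∀ (tab_of_str : List String) (dl_str : Int) (n : Int), Dom_compare_srt tab_of_str dl_str n → Pre_compare_srt tab_of_str dl_str n → Spec_compare_srt tab_of_str dl_str n (compare_srt tab_of_str dl_str n)
-- ===== LEMMAS AND PROOFS =====

-- Proof-side abbreviations over the mutated list M and prefix length N.
def pvIdx (M : List String) (m : Nat) : String := M.getD m ""
-- the segment M[a:b] of the first b elements
def pvSeg (M : List String) (a b : Nat) : List String := (M.take b).drop a
-- how many strings in M[a:b] equal M[m]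
def pvCseg (M : List String) (a b m : Nat) : Int := ((pvSeg M a b).count (pvIdx M m) : Int)
-- multiplicity of M[m] among the first N strings
def pvCnt (M : List String) (N m : Nat) : Int := ((M.take N).count (pvIdx M m) : Int)

-- tab_laczen while row i is being processed, inner index about to be lo
def pvTMid (M : List String) (N i lo : Nat) : List Int :=
  (List.range N).map (fun m =>
    if m < i then pvCnt M N m
    else if m = i then 1 + pvCseg M 0 i i + pvCseg M (i + 1) lo i
    else if m < lo then 1 + pvCseg M 0 i m + (if pvIdx M m = pvIdx M i then 1 else 0)
    else 1 + pvCseg M 0 i m)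

-- maxy after the first i outer rows
def pvMaxy (M : List String) (N : Nat) : Nat → Int
  | 0 => 0
  | i + 1 => if 0 < pvCseg M (i + 1) N i then max (pvMaxy M N i) (pvCnt M N i) else pvMaxy M N i

-- B's max-of-counter value over the prefix P
def pvBval (P : List String) : Int :=
  (PySem.List.max? ((PySem.Set.ofList P).map (fun v => ((P.count v : Int)))) (fun x => x)).getD 0

-- segment helpers
lemma pvCseg_nonneg (M : List String) (a b m : Nat) : 0 ≤ pvCseg M a b m := by
  simp [pvCseg]

lemma pvCseg_empty (M : List String) (a b m : Nat) (h : b ≤ a) : pvCseg M a b m = 0 := by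
  simp [pvCseg, pvSeg, List.drop_eq_nil_of_le, h]

lemma pvSeg_succ (M : List String) (a b : Nat) (hab : a ≤ b) (hb : b < M.length) :
    pvSeg M a (b + 1) = pvSeg M a b ++ [M.getD b ""] := by
  unfold pvSeg
  rw [List.take_add_one, List.drop_append_of_le_length (by simp; omega)]
  simp [List.getElem?_eq_getElem hb, List.getD_eq_getElem?_getD]

lemma pvCseg_succ (M : List String) (a b m : Nat) (hab : a ≤ b) (hb : b < M.length) :
    pvCseg M a (b + 1) m = pvCseg M a b m + (if pvIdx M b = pvIdx M m then 1 else 0) := by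
  unfold pvCseg
  rw [pvSeg_succ M a b hab hb, List.count_append]
  by_cases h : pvIdx M b = pvIdx M m <;> simp [List.count_singleton, pvIdx, h]

lemma pvSeg_split (M : List String) (a b c : Nat) (hab : a ≤ b) (hbc : b ≤ c) (hc : c ≤ M.length) :
    pvSeg M a c = pvSeg M a b ++ pvSeg M b c := by
  unfold pvSeg
  conv_lhs => rw [← List.take_append_drop b (M.take c)]
  rw [List.drop_append_of_le_length (by simp; omega), List.take_take, Nat.min_eq_left hbc]

lemma pvCseg_split (M : List String) (a b c m : Nat) (hab : a ≤ b) (hbc : b ≤ c) (hc : c ≤ M.length) :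
    pvCseg M a c m = pvCseg M a b m + pvCseg M b c m := by
  unfold pvCseg
  rw [pvSeg_split M a b c hab hbc hc, List.count_append]
  omega

lemma pvCnt_decomp (M : List String) (N i : Nat) (hi : i < N) (hN : N ≤ M.length) :
    pvCnt M N i = 1 + pvCseg M 0 i i + pvCseg M (i + 1) N i := by
  have h1 : pvCseg M 0 N i = pvCseg M 0 i i + pvCseg M i N i := pvCseg_split M 0 i N i (by omega) (by omega) hN
  have h2 : pvCseg M i N i = pvCseg M i (i+1) i + pvCseg M (i+1) N i := pvCseg_split M i (i+1) N i (by omega) hi hN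
  have h3 : pvCseg M i (i+1) i = 1 := by
    have h := pvCseg_succ M i i i (le_refl i) (by omega)
    rw [pvCseg_empty M i i i (le_refl i)] at h
    simpa using h
  have h0 : pvCnt M N i = pvCseg M 0 N i := by simp [pvCnt, pvCseg, pvSeg]
  omega

-- generic list utilities
lemma pv_set_map_range {α : Type} (N m : Nat) (f : Nat → α) (v : α) (hm : m < N) :
    (((List.range N).map f).set m v) = (List.range N).map (fun k => if k = m then v else f k) := by
  apply List.ext_getElem (by simp)
  intro k h1 h2
  simp only [List.length_set, List.length_map, List.length_range] at h1
  by_cases hk : k = m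
  · subst hk
    rw [List.getElem_set_self (by simpa using h1)]
    simp
  · rw [List.getElem_set_ne (by omega)]
    simp [hk]

lemma pv_getD_map_range {α : Type} [Inhabited α] (N m : Nat) (f : Nat → α) (d : α) (hm : m < N) :
    (((List.range N).map f).getD m d) = f m := by
  rw [List.getD_eq_getElem?_getD]
  simp [hm]

lemma pvTMid_init (M : List String) (N : Nat) : pvTMid M N 0 0 = List.replicate N 1 := by
  unfold pvTMid
  rw [show List.replicate N (1:Int) = (List.range N).map (fun _ => 1) from by simp [List.map_const']]
  apply List.map_congr_left
  intro m hm
  simp [pvCseg_empty]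

lemma pvTMid_start (M : List String) (N i : Nat) : pvTMid M N i i = pvTMid M N i (i + 1) := by
  unfold pvTMid
  apply List.map_congr_left
  intro m hm
  rcases Nat.lt_trichotomy m i with h | h | h
  · simp [h]
  · subst h
    simp [pvCseg_empty M (m+1) m m (by omega), pvCseg_empty M (m+1) (m+1) m (by omega)]
  · have h1 : ¬ m < i := by omega
    have h2 : m ≠ i := by omega
    have h3 : ¬ m < i + 1 := by omega
    simp [h1, h2, h3]

lemma pvTMid_shift (M : List String) (N i : Nat) (hi : i < N) (hN : N ≤ M.length) :
    pvTMid M N i N = pvTMid M N (i + 1) (i + 1) := by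
  unfold pvTMid
  apply List.map_congr_left
  intro m hm
  simp only [List.mem_range] at hm
  rcases Nat.lt_trichotomy m i with h | h | h
  · simp [h, show m < i + 1 by omega]
  · subst h
    simp only [lt_irrefl, if_false, if_pos rfl, show m < m + 1 by omega, if_true]
    exact (pvCnt_decomp M N m hi hN).symm
  · have h1 : ¬ m < i := by omega
    have h2 : m ≠ i := by omega
    have h3 : ¬ m < i + 1 := by omega
    rw [if_neg h1, if_neg h2, if_pos hm, if_neg h3]
    have hs : pvCseg M 0 (i+1) m = pvCseg M 0 i m + (if pvIdx M i = pvIdx M m then 1 else 0) :=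
      pvCseg_succ M 0 i m (by omega) (by omega)
    by_cases hmi : m = i + 1
    · subst hmi
      rw [if_pos rfl, hs, pvCseg_empty M (i+1+1) (i+1) (i+1) (by omega)]
      by_cases he : pvIdx M i = pvIdx M (i+1)
      · simp [he]; omega
      · rw [if_neg (fun h' => he h'.symm), if_neg he]; omega
    · rw [if_neg hmi, if_neg h3, hs]
      by_cases he : pvIdx M i = pvIdx M m
      · simp [he]; omega
      · rw [if_neg (fun h' => he h'.symm), if_neg he]; omega


lemma pvTMid_getD (M : List String) (N i lo m : Nat) (hm : m < N) :
    (pvTMid M N i lo).getD m 0 =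
      (if m < i then pvCnt M N m
       else if m = i then 1 + pvCseg M 0 i i + pvCseg M (i + 1) lo i
       else if m < lo then 1 + pvCseg M 0 i m + (if pvIdx M m = pvIdx M i then 1 else 0)
       else 1 + pvCseg M 0 i m) := by
  unfold pvTMid
  rw [pv_getD_map_range N m _ 0 hm]

-- one inner iteration, equal case: the two list writes advance lo by one
lemma pv_step_set (M : List String) (N i lo : Nat) (hi : i < lo) (hlo : lo < N) (hN : N ≤ M.length)
    (heq : M.getD i "" = M.getD lo "") :
    (((pvTMid M N i lo).set i ((pvTMid M N i lo).getD i 0 + 1)).set lo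
        (((pvTMid M N i lo).set i ((pvTMid M N i lo).getD i 0 + 1)).getD lo 0 + 1))
      = pvTMid M N i (lo + 1) := by
  have hiN : i < N := by omega
  unfold pvTMid
  rw [pv_getD_map_range N i _ 0 hiN, pv_set_map_range N i _ _ hiN]
  rw [pv_getD_map_range N lo _ 0 hlo, pv_set_map_range N lo _ _ hlo]
  apply List.map_congr_left
  intro m hm
  simp only [List.mem_range] at hm
  by_cases hmlo : m = lo
  · subst hmlo
    simp only [if_pos rfl, if_neg (show ¬ m = i by omega), if_neg (show ¬ m < i by omega),
      if_neg (lt_irrefl m), if_pos (show m < m + 1 by omega),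
      if_pos (show pvIdx M m = pvIdx M i from heq.symm)]
    simp
  · rw [if_neg hmlo]
    by_cases hmi : m = i
    · subst hmi
      simp only [if_pos rfl, if_neg (lt_irrefl m)]
      rw [pvCseg_succ M (m + 1) lo m hi (by omega),
        if_pos (show pvIdx M lo = pvIdx M m from heq.symm)]
      simp
      ring
    · rw [if_neg hmi]
      rcases Nat.lt_trichotomy m i with h | h | h
      · rw [if_pos h, if_pos h]
      · exact absurd h hmi
      · rw [if_neg (by omega : ¬ m < i), if_neg hmi, if_neg (by omega : ¬ m < i), if_neg hmi]
        by_cases hmlo' : m < lo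
        · rw [if_pos hmlo', if_pos (by omega : m < lo + 1)]
        · rw [if_neg hmlo', if_neg (by omega : ¬ m < lo + 1)]

lemma pv_inner (M : List String) (N : Nat) (i : Nat) :
    ∀ (lo : Nat) (maxy : Int), i < lo → lo ≤ N → N ≤ M.length →
    ((PySem.List.pyRange (lo : Int) (N : Int) 1).foldl
      (fun st j =>
          let a := PySem.List.pyGetD M (i : Int) "";
          let b := PySem.List.pyGetD M j "";
          if a = b then
            let t1 := PySem.List.pySetD st.1 (i : Int) (PySem.List.pyGetD st.1 (i : Int) 0 + 1)
            let t2 := PySem.List.pySetD t1 j (PySem.List.pyGetD t1 j 0 + 1)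
            (t2, if st.2 < PySem.List.pyGetD t2 (i : Int) 0 then PySem.List.pyGetD t2 (i : Int) 0 else st.2)
          else st)
      (pvTMid M N i lo, maxy))
    = (pvTMid M N i N, if 0 < pvCseg M lo N i then max maxy (pvCnt M N i) else maxy) := by
  suffices H : ∀ (k lo : Nat) (maxy : Int), i < lo → lo ≤ N → k = N - lo → N ≤ M.length →
      ((PySem.List.pyRange (lo : Int) (N : Int) 1).foldl
        (fun st j =>
            let a := PySem.List.pyGetD M (i : Int) "";
            let b := PySem.List.pyGetD M j "";
            if a = b then
              let t1 := PySem.List.pySetD st.1 (i : Int) (PySem.List.pyGetD st.1 (i : Int) 0 + 1)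
              let t2 := PySem.List.pySetD t1 j (PySem.List.pyGetD t1 j 0 + 1)
              (t2, if st.2 < PySem.List.pyGetD t2 (i : Int) 0 then PySem.List.pyGetD t2 (i : Int) 0 else st.2)
            else st)
        (pvTMid M N i lo, maxy))
      = (pvTMid M N i N, if 0 < pvCseg M lo N i then max maxy (pvCnt M N i) else maxy) by
    intro lo maxy h1 h2 h3
    exact H (N - lo) lo maxy h1 h2 rfl h3
  intro k
  induction k with
  | zero =>
    intro lo maxy h1 h2 hk hN
    have hlo : lo = N := by omega
    subst hlo
    rw [PySem.List.pyRange_one_eq_nil (le_refl _)]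
    rw [pvCseg_empty M lo lo i (le_refl _)]
    simp
  | succ k ih =>
    intro lo maxy h1 h2 hk hN
    have hloN : lo < N := by omega
    have hiN : i < N := by omega
    rw [PySem.List.pyRange_one_cons (by exact_mod_cast hloN)]
    rw [List.foldl_cons]
    have this := ih (lo + 1) (if maxy < 1 + pvCseg M 0 i i + pvCseg M (i+1) (lo+1) i then 1 + pvCseg M 0 i i + pvCseg M (i+1) (lo+1) i else maxy) (by omega) (by omega) (by omega) hN
    have this2 := ih (lo + 1) maxy (by omega) (by omega) (by omega) hN
    simp only [PySem.List.pyGetD_natCast, PySem.List.pySetD_natCast] at this this2 ⊢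
    push_cast at this this2 ⊢
    by_cases heq : M.getD i "" = M.getD lo ""
    · rw [if_pos heq]
      rw [pv_step_set M N i lo h1 hloN hN heq]
      rw [pvTMid_getD M N i (lo+1) i hiN, if_neg (lt_irrefl i), if_pos rfl]
      rw [this]
      have hsp : pvCseg M lo N i = pvCseg M lo (lo+1) i + pvCseg M (lo+1) N i :=
        pvCseg_split M lo (lo+1) N i (by omega) (by omega) hN
      have hone : pvCseg M lo (lo+1) i = 1 := by
        rw [pvCseg_succ M lo lo i (le_refl lo) (by omega), pvCseg_empty M lo lo i (le_refl lo),
          if_pos (show pvIdx M lo = pvIdx M i from heq.symm)]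
        norm_num
      have hcnt : pvCnt M N i = 1 + pvCseg M 0 i i + pvCseg M (i+1) N i := pvCnt_decomp M N i hiN hN
      have hsp2 : pvCseg M (i+1) N i = pvCseg M (i+1) (lo+1) i + pvCseg M (lo+1) N i :=
        pvCseg_split M (i+1) (lo+1) N i (by omega) (by omega) hN
      have hnn : 0 ≤ pvCseg M (lo+1) N i := pvCseg_nonneg M (lo+1) N i
      ext1
      · rfl
      · simp only
        split_ifs <;> omega
    · rw [if_neg heq]
      have hbump : pvTMid M N i lo = pvTMid M N i (lo + 1) := by
        unfold pvTMid
        apply List.map_congr_left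
        intro m hm
        simp only [List.mem_range] at hm
        rcases Nat.lt_trichotomy m i with h | h | h
        · simp [h]
        · subst h
          simp only [if_neg (lt_irrefl m), if_pos rfl]
          rw [pvCseg_split M (m+1) lo (lo+1) m (by omega) (by omega) (by omega)]
          rw [pvCseg_succ M lo lo m (le_refl lo) (by omega), pvCseg_empty M lo lo m (le_refl lo)]
          rw [if_neg (show ¬ pvIdx M lo = pvIdx M m from fun h' => heq h'.symm)]
          simp
        · rw [if_neg (by omega : ¬ m < i), if_neg (by omega : ¬ m = i),
              if_neg (by omega : ¬ m < i), if_neg (by omega : ¬ m = i)]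
          by_cases hmlo : m < lo
          · rw [if_pos hmlo, if_pos (by omega : m < lo + 1)]
          · by_cases hmlo1 : m < lo + 1
            · have hmeq : m = lo := by omega
              subst hmeq
              rw [if_neg hmlo, if_pos hmlo1]
              rw [if_neg (show ¬ pvIdx M m = pvIdx M i from fun h' => heq h'.symm)]
              ring
            · rw [if_neg hmlo, if_neg hmlo1]
      have hcs : pvCseg M lo N i = pvCseg M (lo + 1) N i := by
        rw [pvCseg_split M lo (lo+1) N i (by omega) (by omega) hN]
        rw [pvCseg_succ M lo lo i (le_refl lo) (by omega), pvCseg_empty M lo lo i (le_refl lo)]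
        rw [if_neg (show ¬ pvIdx M lo = pvIdx M i from fun h' => heq h'.symm)]
        ring
      rw [hbump, hcs]
      exact this2

lemma pv_outer (M : List String) (N : Nat) (hN : N ≤ M.length) :
    ∀ i : Nat, i ≤ N →
    ((PySem.List.pyRange 0 (i : Int) 1).foldl
      (fun st i =>
        (PySem.List.pyRange (i + 1) (N : Int) 1).foldl
          (fun st j =>
            let a := PySem.List.pyGetD M i "";
            let b := PySem.List.pyGetD M j "";
            if a = b then
              let t1 := PySem.List.pySetD st.1 i (PySem.List.pyGetD st.1 i 0 + 1)
              let t2 := PySem.List.pySetD t1 j (PySem.List.pyGetD t1 j 0 + 1)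
              (t2, if st.2 < PySem.List.pyGetD t2 i 0 then PySem.List.pyGetD t2 i 0 else st.2)
            else st) st)
      (List.replicate N (1 : Int), (0 : Int)))
    = (pvTMid M N i i, pvMaxy M N i) := by
  intro i
  induction i with
  | zero =>
    intro _
    rw [show ((0:Nat) : Int) = 0 by norm_num, PySem.List.pyRange_one_eq_nil (le_refl 0)]
    rw [List.foldl_nil, pvTMid_init]
    rfl
  | succ i ih =>
    intro hiN
    have h0i : (0:Int) ≤ (i:Int) := by positivity
    rw [show ((i+1 : Nat) : Int) = (i : Int) + 1 by push_cast; ring]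
    rw [PySem.List.pyRange_one_succ_right h0i, List.foldl_append, ih (by omega), List.foldl_cons, List.foldl_nil]
    have hstart := pvTMid_start M N i
    have hinner := pv_inner M N i (i+1) (pvMaxy M N i) (by omega) hiN hN
    push_cast at hinner
    rw [hstart]
    rw [hinner]
    rw [pvTMid_shift M N i hiN hN]
    have : pvMaxy M N (i+1) = if 0 < pvCseg M (i + 1) N i then max (pvMaxy M N i) (pvCnt M N i) else pvMaxy M N i := rfl
    rw [this]

lemma pvMaxy_cases (M : List String) (N : Nat) :
    ∀ i : Nat, pvMaxy M N i = 0 ∨ ∃ m, m < i ∧ 0 < pvCseg M (m + 1) N m ∧ pvMaxy M N i = pvCnt M N m := by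
  intro i
  induction i with
  | zero => left; rfl
  | succ i ih =>
    by_cases h : 0 < pvCseg M (i + 1) N i
    · have hstep : pvMaxy M N (i+1) = max (pvMaxy M N i) (pvCnt M N i) := by simp [pvMaxy, h]
      rcases le_or_gt (pvCnt M N i) (pvMaxy M N i) with hle | hlt
      · rw [hstep, max_eq_left hle]
        rcases ih with h0 | ⟨m, hm1, hm2, hm3⟩
        · exact Or.inl h0
        · exact Or.inr ⟨m, by omega, hm2, hm3⟩
      · exact Or.inr ⟨i, by omega, h, by rw [hstep, max_eq_right hlt.le]⟩
    · have hstep : pvMaxy M N (i+1) = pvMaxy M N i := by simp [pvMaxy, h]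
      rw [hstep]
      rcases ih with h0 | ⟨m, hm1, hm2, hm3⟩
      · exact Or.inl h0
      · exact Or.inr ⟨m, by omega, hm2, hm3⟩

lemma pvMaxy_ge (M : List String) (N : Nat) (m : Nat) :
    ∀ i : Nat, m < i → 0 < pvCseg M (m + 1) N m → pvCnt M N m ≤ pvMaxy M N i := by
  intro i
  induction i with
  | zero => omega
  | succ i ih =>
    intro hmi hc
    by_cases hm : m = i
    · subst hm
      simp [pvMaxy, hc, le_max_right]
    · have h1 := ih (by omega) hc
      by_cases h : 0 < pvCseg M (i + 1) N i <;> simp [pvMaxy, h] <;> omega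

lemma pvBval_le (P : List String) (v : String) (hv : v ∈ P) : (P.count v : Int) ≤ pvBval P := by
  unfold pvBval
  have hmem : ((P.count v : Int)) ∈ (PySem.Set.ofList P).map (fun v => ((P.count v : Int))) :=
    List.mem_map_of_mem (by simpa [PySem.Set.mem_ofList] using hv)
  rcases hx : PySem.List.max? ((PySem.Set.ofList P).map (fun v => ((P.count v : Int)))) (fun x => x) with _ | m
  · rw [PySem.List.max?_eq_none_iff] at hx
    simp [hx] at hmem
  · simpa using PySem.List.max?_isMax hx _ hmem

lemma pvBval_mem (P : List String) (hP : P ≠ []) : ∃ v ∈ P, pvBval P = (P.count v : Int) := by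
  unfold pvBval
  rcases hx : PySem.List.max? ((PySem.Set.ofList P).map (fun v => ((P.count v : Int)))) (fun x => x) with _ | m
  · rw [PySem.List.max?_eq_none_iff] at hx
    simp at hx
    apply absurd _ hP
    rcases P with _ | ⟨x, xs⟩
    · rfl
    · exfalso
      have : x ∈ PySem.Set.ofList (x :: xs) := by simp [PySem.Set.mem_ofList]
      simp [hx] at this
  · have := PySem.List.max?_mem hx
    simp only [List.mem_map] at this
    rcases this with ⟨v, hv, hveq⟩
    exact ⟨v, by simpa [PySem.Set.mem_ofList] using hv, by simp [hveq]⟩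

lemma pvIdx_getElem (M : List String) (m : Nat) (hm : m < M.length) : pvIdx M m = M[m] := by
  simp [pvIdx, List.getD_eq_getElem?_getD, List.getElem?_eq_getElem hm]

lemma pvIdx_mem (M : List String) (N m : Nat) (hm : m < N) (hN : N ≤ M.length) :
    pvIdx M m ∈ M.take N := by
  rw [pvIdx_getElem M m (by omega)]
  rw [show M[m] = (M.take N)[m]'(by simp; omega) from (List.getElem_take).symm]
  exact List.getElem_mem _

lemma pv_first_idx (M : List String) (N : Nat) (hN : N ≤ M.length) (v : String)
    (hv : v ∈ M.take N) (h2 : 2 ≤ (M.take N).count v) :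
    ∃ k, k < N ∧ pvIdx M k = v ∧ 0 < pvCseg M (k + 1) N k := by
  have hPlen : (M.take N).length = N := by simp [hN]
  rcases hidx : PySem.List.index? (M.take N) v with _ | k
  · rw [PySem.List.index?_eq_none_iff] at hidx
    exact absurd hv hidx
  · obtain ⟨hk, hPk, hfirst⟩ := PySem.List.getElem_of_index?_eq_some hidx
    have hkN : k < N := by omega
    have hik : pvIdx M k = v := by
      rw [pvIdx_getElem M k (by omega), show M[k]'(by omega) = (M.take N)[k]'(by omega) from (List.getElem_take).symm, hPk]
    refine ⟨k, hkN, hik, ?_⟩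
    -- count of v in the part after k is count - 1 ≥ 1
    have hdropk : (M.take N).drop k = v :: (M.take N).drop (k + 1) := by
      rw [List.drop_eq_getElem_cons hk, hPk]
    have htake0 : ((M.take N).take k).count v = 0 := by
      rw [List.count_eq_zero]
      intro hmem
      obtain ⟨j, hj, hPj⟩ := List.getElem_of_mem hmem
      have hjk : j < k := by simp at hj; omega
      have : (M.take N)[j]'(by omega) = v := by
        rw [← hPj]
        exact (List.getElem_take).symm
      exact hfirst j hjk this
    have hsplit : (M.take N).count v = ((M.take N).take k).count v + ((M.take N).drop k).count v := by
      conv_lhs => rw [← List.take_append_drop k (M.take N)]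
      rw [List.count_append]
    rw [hdropk, List.count_cons_self, htake0] at hsplit
    have : pvCseg M (k + 1) N k = (((M.take N).drop (k + 1)).count v : Int) := by
      simp [pvCseg, pvSeg, hik]
    omega

lemma pv_final (M : List String) (N : Nat) (hN : N ≤ M.length) (h1 : 1 ≤ N) :
    pvMaxy M N N = if 2 ≤ pvBval (M.take N) then pvBval (M.take N) else 0 := by
  have hPlen : (M.take N).length = N := by simp [hN]
  have hPne : M.take N ≠ [] := by
    intro h
    rw [h] at hPlen
    simp at hPlen
    omega
  by_cases hb : 2 ≤ pvBval (M.take N)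
  · rw [if_pos hb]
    obtain ⟨v, hvP, hveq⟩ := pvBval_mem (M.take N) hPne
    have h2 : 2 ≤ (M.take N).count v := by omega
    obtain ⟨k, hkN, hik, hkpos⟩ := pv_first_idx M N hN v hvP h2
    have hcntk : pvCnt M N k = pvBval (M.take N) := by
      rw [pvCnt, hik, hveq]
    have hge : pvBval (M.take N) ≤ pvMaxy M N N := by
      rw [← hcntk]
      exact pvMaxy_ge M N k N hkN hkpos
    rcases pvMaxy_cases M N N with h0 | ⟨m, hm1, hm2, hm3⟩
    · omega
    · have : pvCnt M N m ≤ pvBval (M.take N) := pvBval_le (M.take N) (pvIdx M m) (pvIdx_mem M N m hm1 hN)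
      omega
  · rw [if_neg hb]
    rcases pvMaxy_cases M N N with h0 | ⟨m, hm1, hm2, hm3⟩
    · exact h0
    · exfalso
      have hd := pvCnt_decomp M N m hm1 hN
      have hnn : 0 ≤ pvCseg M 0 m m := by simp [pvCseg]
      have hle : pvCnt M N m ≤ pvBval (M.take N) := pvBval_le (M.take N) (pvIdx M m) (pvIdx_mem M N m hm1 hN)
      omega

-- ===== VERDICT (by name: the statement is the Claim_ definition above) =====
theorem compare_srt_spec : Claim_equal_compare_srt := by
  intro tab dl n _ hpre
  unfold Spec_compare_srt compare_srt compare_srt_alt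
  by_cases hn : n < 1
  · simp [hn]
  · rw [if_neg hn, if_neg hn]
    have hn0 : 0 ≤ n := by omega
    have hlen : n ≤ (tab.length : Int) := by
      rcases hpre with h | ⟨h, _⟩
      · omega
      · exact h
    have hmuteq : (fun s =>
        match PySem.Str.pyGet? s 0, PySem.Str.pyGet? s (-1) with
        | some c0, some cl => if cl < c0 then (PySem.Str.slice? s none none (-1)).getD s else s
        | _, _ => s) = pvRevIf := rfl
    rw [hmuteq]
    set M := (PySem.List.sorted tab (fun s => s) false).map pvRevIf with hM
    have hMA : obroc_wyrazy (PySem.List.sorted tab (fun s => s) false) = M := rfl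
    rw [hMA]
    have hMlen : (M.length : Int) = (tab.length : Int) := by
      simp [hM, PySem.List.length_sorted]
    set N := n.toNat with hNdef
    have hNM : N ≤ M.length := by omega
    have hN1 : 1 ≤ N := by omega
    have hcast : ((N : Nat) : Int) = n := Int.toNat_of_nonneg hn0
    rw [← hcast]
    have houter := pv_outer M N hNM N (le_refl N)
    dsimp only at houter ⊢
    rw [houter]
    rw [PySem.List.slice_to_natCast]
    rw [PySem.Dict.foldl_insert_getD_add_one_eq_counter]
    have hvals : (PySem.Dict.counter (M.take N)).values
        = (PySem.Set.ofList (M.take N)).map (fun k => (((M.take N).count k : Int))) := by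
      have h := PySem.Dict.items_counter (κ := String) (M.take N)
      simp [PySem.Dict.values, h]
    rw [hvals]
    have hBv : (PySem.List.max? ((PySem.Set.ofList (M.take N)).map (fun k => (((M.take N).count k : Int)))) (fun x => x)).getD 0 = pvBval (M.take N) := rfl
    rw [hBv]
    exact pv_final M N hNM hN1
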